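-- pv_equiv track=rewrite | github.com/MohammedMaisoon/ats_telegram_bot | scanner.py | _match_field_order
-- ===== SOURCE A (Python) =====
-- def _match_field_order(fields):
--     if len(fields) < 2:
--         return None
--
--     hints = [hint for _, hint in fields]
--     if any("resume" in hint for hint in hints) and any("job" in hint or "description" in hint for hint in hints):
--         resume_index = next(i for i, h in enumerate(hints) if "resume" in h)
--         jd_index = next(i for i, h in enumerate(hints) if "job" in h or "description" in h)
--         return resume_index, jd_index
--     return 0, 1
-- ===== SOURCE B (Python) =====
-- def _match_field_order(fields):
--     if len(fields) < 2:
--         return None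
--     resume_index = None
--     jd_index = None
--     for i, (_, hint) in enumerate(fields):
--         if resume_index is None and "resume" in hint:
--             resume_index = i
--         if jd_index is None and ("job" in hint or "description" in hint):
--             jd_index = i
--         if resume_index is not None and jd_index is not None:
--             break
--     if resume_index is not None and jd_index is not None:
--         return resume_index, jd_index
--     return 0, 1
-- ===== Notes on version B (the rewrite author's own statement) =====
-- stated objective: simpler
-- what changed: Replaced A's four separate scans of the hint list (two any() passes plus two next()/enumerate passes) by one enumerate loop over the fields that records the first matching index for each pattern and breaks once both are found.
import Mathlib
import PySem

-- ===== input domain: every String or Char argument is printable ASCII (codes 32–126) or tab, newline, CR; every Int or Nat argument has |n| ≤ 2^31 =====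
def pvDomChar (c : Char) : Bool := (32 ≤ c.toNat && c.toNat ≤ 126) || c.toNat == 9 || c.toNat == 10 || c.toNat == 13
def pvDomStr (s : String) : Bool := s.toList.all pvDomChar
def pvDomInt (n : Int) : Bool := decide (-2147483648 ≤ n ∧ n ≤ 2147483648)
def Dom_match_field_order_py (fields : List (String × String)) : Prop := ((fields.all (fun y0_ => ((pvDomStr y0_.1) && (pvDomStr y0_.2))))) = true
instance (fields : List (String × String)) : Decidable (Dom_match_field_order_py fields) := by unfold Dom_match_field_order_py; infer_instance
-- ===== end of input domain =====

-- B replaces A's four scans of the hints (two any(), two next()) by one enumerate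
-- loop recording the first index for each pattern, breaking once both are set (simpler).

-- ===== PORT A =====
def match_field_order_py (fields : List (String × String)) : Option (Int × Int) :=
  if fields.length < 2 then none
  else
    let hints := fields.map (fun x => x.2)
    if hints.any (fun h => PySem.Str.isIn "resume" h) &&
       hints.any (fun h => PySem.Str.isIn "job" h || PySem.Str.isIn "description" h) then
      -- next(...) over enumerate; the guard guarantees a match exists, so the getD 0 is never hit
      let resume_index :=
        (((PySem.List.enumerate hints 0).find? (fun x => PySem.Str.isIn "resume" x.2)).map (fun x => x.1)).getD 0
      let jd_index :=
        (((PySem.List.enumerate hints 0).find? (fun x => PySem.Str.isIn "job" x.2 || PySem.Str.isIn "description" x.2)).map (fun x => x.1)).getD 0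
      some (resume_index, jd_index)
    else some (0, 1)

-- ===== PORT B =====
-- the enumerate loop of Source B: i is the current index, r/j the recorded first indices;
-- the early 'if r'.isSome && j'.isSome' branch is the Python 'break'
def mfoLoop (hints : List String) (i : Int) (r j : Option Int) : Option Int × Option Int :=
  match hints with
  | [] => (r, j)
  | h :: t =>
    let r' := if r.isNone && PySem.Str.isIn "resume" h then some i else r
    let j' := if j.isNone && (PySem.Str.isIn "job" h || PySem.Str.isIn "description" h) then some i else j
    if r'.isSome && j'.isSome then (r', j') else mfoLoop t (i + 1) r' j'

def match_field_order_py_alt (fields : List (String × String)) : Option (Int × Int) :=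
  if fields.length < 2 then none
  else
    match mfoLoop (fields.map (fun x => x.2)) 0 none none with
    | (some r, some j) => some (r, j)
    | _ => some (0, 1)

-- ===== PRECONDITION & SPEC =====
def Spec_match_field_order_py (fields : List (String × String)) (out : Option (Int × Int)) : Prop := out = match_field_order_py_alt fields
instance (fields : List (String × String)) (out : Option (Int × Int)) : Decidable (Spec_match_field_order_py fields out) := by unfold Spec_match_field_order_py; infer_instance

-- ===== CLAIM (what is proved, stated in full; the proofs are below) =====
def Claim_equal_match_field_order_py : Prop := ∀ (fields : List (String × String)), Dom_match_field_order_py fields → Spec_match_field_order_py fields (match_field_order_py fields)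

-- ===== LEMMAS AND PROOFS =====

-- first index (counting from i) of a hint satisfying p, exactly as A's next(enumerate) computes it
def fIdx (p : String → Bool) (hints : List String) (i : Int) : Option Int :=
  (((PySem.List.enumerate hints i).find? (fun x => p x.2)).map (fun x => x.1))

def P1 (h : String) : Bool := PySem.Str.isIn "resume" h
def P2 (h : String) : Bool := PySem.Str.isIn "job" h || PySem.Str.isIn "description" h

lemma fIdx_nil (p : String → Bool) (i : Int) : fIdx p [] i = none := by
  simp [fIdx, PySem.List.enumerate_nil]

lemma fIdx_cons (p : String → Bool) (h : String) (t : List String) (i : Int) :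
    fIdx p (h :: t) i = if p h then some i else fIdx p t (i + 1) := by
  simp [fIdx, PySem.List.enumerate_cons, List.find?]
  by_cases hp : p h <;> simp [hp]

lemma fIdx_isSome_eq_any (p : String → Bool) (hints : List String) (i : Int) :
    (fIdx p hints i).isSome = hints.any p := by
  induction hints generalizing i with
  | nil => simp [fIdx_nil]
  | cons h t ih =>
    rw [fIdx_cons]
    by_cases hp : p h <;> simp [hp, ih]

lemma mfoLoop_some_none (hints : List String) (i a : Int) :
    mfoLoop hints i (some a) none = (some a, fIdx P2 hints i) := by
  induction hints generalizing i with
  | nil => simp [mfoLoop, fIdx_nil]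
  | cons h t ih =>
    rw [fIdx_cons]
    simp only [mfoLoop, P2]
    by_cases hp : (PySem.Str.isIn "job" h || PySem.Str.isIn "description" h) = true
    · simp only [hp]; simp
    · rw [Bool.not_eq_true] at hp; simp only [hp]; simp [ih]

lemma mfoLoop_none_some (hints : List String) (i b : Int) :
    mfoLoop hints i none (some b) = (fIdx P1 hints i, some b) := by
  induction hints generalizing i with
  | nil => simp [mfoLoop, fIdx_nil]
  | cons h t ih =>
    rw [fIdx_cons]
    simp only [mfoLoop, P1]
    by_cases hp : PySem.Str.isIn "resume" h = true
    · simp only [hp]; simp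
    · rw [Bool.not_eq_true] at hp; simp only [hp]; simp [ih]

lemma mfoLoop_none_none (hints : List String) (i : Int) :
    mfoLoop hints i none none = (fIdx P1 hints i, fIdx P2 hints i) := by
  induction hints generalizing i with
  | nil => simp [mfoLoop, fIdx_nil]
  | cons h t ih =>
    rw [fIdx_cons, fIdx_cons]
    simp only [mfoLoop, P1, P2]
    by_cases h1 : PySem.Str.isIn "resume" h = true <;>
      by_cases h2 : (PySem.Str.isIn "job" h || PySem.Str.isIn "description" h) = true
    · simp only [h1, h2]; simp
    · rw [Bool.not_eq_true] at h2; simp only [h1, h2]; simp [mfoLoop_some_none]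
    · rw [Bool.not_eq_true] at h1; simp only [h1, h2]; simp [mfoLoop_none_some]
    · rw [Bool.not_eq_true] at h1 h2; simp only [h1, h2]; simp [ih]

-- ===== VERDICT (by name: the statement is the Claim_ definition above) =====
theorem match_field_order_py_spec : Claim_equal_match_field_order_py := by
  intro fields _
  unfold Spec_match_field_order_py
  by_cases hlen : fields.length < 2
  · simp [match_field_order_py, match_field_order_py_alt, hlen]
  · have hA : match_field_order_py fields =
        if ((fields.map (fun x => x.2)).any (fun h => PySem.Str.isIn "resume" h) &&
            (fields.map (fun x => x.2)).any (fun h => PySem.Str.isIn "job" h || PySem.Str.isIn "description" h)) = true then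
          some ((fIdx P1 (fields.map (fun x => x.2)) 0).getD 0, (fIdx P2 (fields.map (fun x => x.2)) 0).getD 0)
        else some (0, 1) := by
      unfold match_field_order_py; rw [if_neg hlen]; rfl
    have hB : match_field_order_py_alt fields =
        (match (fIdx P1 (fields.map (fun x => x.2)) 0, fIdx P2 (fields.map (fun x => x.2)) 0) with
         | (some r, some j) => some (r, j)
         | _ => some (0, 1)) := by
      unfold match_field_order_py_alt; rw [if_neg hlen, mfoLoop_none_none]
    rw [hA, hB]
    have e1 : (fields.map (fun x => x.2)).any (fun h => PySem.Str.isIn "resume" h)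
        = (fIdx P1 (fields.map (fun x => x.2)) 0).isSome := (fIdx_isSome_eq_any P1 _ 0).symm
    have e2 : (fields.map (fun x => x.2)).any (fun h => PySem.Str.isIn "job" h || PySem.Str.isIn "description" h)
        = (fIdx P2 (fields.map (fun x => x.2)) 0).isSome := (fIdx_isSome_eq_any P2 _ 0).symm
    simp only [e1, e2]
    cases c1 : fIdx P1 (fields.map (fun x => x.2)) 0 <;>
      cases c2 : fIdx P2 (fields.map (fun x => x.2)) 0 <;> simp
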